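-- pv_equiv track=rewrite | github.com/theultimat/idli-v2 | scripts/objdump.py | _parse_op_m
-- ===== SOURCE A (Python) =====
-- def _parse_op_m(enc):
--     if not enc:
--         raise Exception(f'No one bit in M: {bin(enc)}')
--
--     out = ''
--
--     while enc != 1:
--         out += 't' if enc & 1 else 'f'
--         enc >>= 1
--
--     return out
-- ===== SOURCE B (Python) =====
-- def _parse_op_m(enc):
--     if not enc:
--         raise Exception(f'No one bit in M: {bin(enc)}')
--
--     s = bin(enc)[3:]  # drop '0b' prefix and the leading sentinel '1' bit
--     return ''.join('t' if c == '1' else 'f' for c in reversed(s))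
-- ===== Notes on version B (the rewrite author's own statement) =====
-- stated objective: idiomatic
-- what changed: Replaces the bit-shifting while-loop accumulator with a single bin() conversion followed by one mapped pass over the reversed digit string.
import Mathlib
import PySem

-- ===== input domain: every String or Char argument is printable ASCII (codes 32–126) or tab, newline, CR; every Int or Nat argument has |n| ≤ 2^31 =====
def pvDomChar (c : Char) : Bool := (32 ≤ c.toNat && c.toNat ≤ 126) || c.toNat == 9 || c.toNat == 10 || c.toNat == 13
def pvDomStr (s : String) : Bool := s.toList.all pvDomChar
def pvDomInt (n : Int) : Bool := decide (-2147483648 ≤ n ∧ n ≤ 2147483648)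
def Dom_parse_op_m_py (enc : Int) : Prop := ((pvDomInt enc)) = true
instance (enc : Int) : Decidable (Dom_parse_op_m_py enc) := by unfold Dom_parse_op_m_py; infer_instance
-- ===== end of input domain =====

-- B replaces A's bit-shifting while-loop with a single bin() conversion plus one mapped
-- pass over the reversed digit string (objective: idiomatic).

-- ===== PORT A =====
-- while enc != 1: out += 't' if enc & 1 else 'f'; enc >>= 1
-- (for enc < 0 the Python loop never terminates; the 'enc ≤ 0' guard only totalizes the
-- recursion and is never reached under Pre_)
def pvLoopA (enc : Int) (out : String) : String :=
  if enc ≤ 0 then out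
  else if enc = 1 then out
  else pvLoopA (enc >>> (1 : Nat)) (out ++ (if PySem.Int.band enc 1 ≠ 0 then "t" else "f"))
termination_by enc.toNat
decreasing_by
  have h2 : (2:Int) ≤ enc := by omega
  have hs : enc >>> (1 : Nat) = enc / 2 := by
    simp [Int.shiftRight_eq_div_pow]
  omega

def parse_op_m_py (enc : Int) : String :=
  if enc = 0 then ""           -- Python raises Exception here; excluded by Pre_
  else pvLoopA enc ""

-- ===== PORT B =====
def parse_op_m_py_alt (enc : Int) : String :=
  if enc = 0 then ""           -- Python raises Exception here; excluded by Pre_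
  else
    let s := PySem.List.slice (PySem.Int.toBinChars0b enc) (some 3) none   -- bin(enc)[3:]
    String.ofList (s.reverse.map (fun c => if c = '1' then 't' else 'f'))

-- ===== PRECONDITION & SPEC =====
-- Pre_ excludes enc = 0, where A raises an Exception, and enc < 0, where A's while-loop
-- never terminates (enc >>= 1 stalls at -1); A returns normally exactly for enc ≥ 1.
def Pre_parse_op_m_py (enc : Int) : Prop := 1 ≤ enc
instance (enc : Int) : Decidable (Pre_parse_op_m_py enc) := by unfold Pre_parse_op_m_py; infer_instance
def pvWitness_parse_op_m_py : Int := (6)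

def Spec_parse_op_m_py (enc : Int) (out : String) : Prop := out = parse_op_m_py_alt enc
instance (enc : Int) (out : String) : Decidable (Spec_parse_op_m_py enc out) := by unfold Spec_parse_op_m_py; infer_instance

-- ===== CLAIM (what is proved, stated in full; the proofs are below) =====
def Claim_equal_parse_op_m_py : Prop := ∀ (enc : Int), Dom_parse_op_m_py enc → Pre_parse_op_m_py enc → Spec_parse_op_m_py enc (parse_op_m_py enc)

-- ===== LEMMAS AND PROOFS =====

-- Nat.toDigitsCore: the accumulator is appended on the right
lemma pv_tdc_acc : ∀ (f m : Nat) (ds : List Char),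
    Nat.toDigitsCore 2 f m ds = Nat.toDigitsCore 2 f m [] ++ ds := by
  intro f
  induction f with
  | zero => intro m ds; simp [Nat.toDigitsCore]
  | succ g ih =>
    intro m ds
    simp only [Nat.toDigitsCore]
    by_cases h : m / 2 = 0
    · simp [h]
    · simp only [h]
      rw [ih (m / 2) (Nat.digitChar (m % 2) :: ds), ih (m / 2) [Nat.digitChar (m % 2)]]
      simp

-- fuel irrelevance for Nat.toDigitsCore with empty accumulator
lemma pv_tdc_fuel : ∀ (m f : Nat), m < f → Nat.toDigitsCore 2 f m [] = Nat.toDigits 2 m := by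
  intro m
  induction m using Nat.strong_induction_on with
  | _ m ih =>
    intro f hf
    obtain ⟨g, rfl⟩ : ∃ g, f = g + 1 := ⟨f - 1, by omega⟩
    show Nat.toDigitsCore 2 (g+1) m [] = Nat.toDigitsCore 2 (m+1) m []
    simp only [Nat.toDigitsCore]
    by_cases h : m / 2 = 0
    · simp [h]
    · simp only [h]
      rw [pv_tdc_acc g (m/2), pv_tdc_acc m (m/2)]
      have hlt : m / 2 < m := by omega
      rw [ih (m/2) hlt g (by omega), ih (m/2) hlt m (by omega)]

-- recursive characterization of the binary digit string
lemma pv_toDigits_two_rec (m : Nat) (h2 : 2 ≤ m) :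
    Nat.toDigits 2 m = Nat.toDigits 2 (m / 2) ++ [Nat.digitChar (m % 2)] := by
  show Nat.toDigitsCore 2 (m+1) m [] = _
  simp only [Nat.toDigitsCore]
  have h : ¬ m / 2 = 0 := by omega
  simp only [h]
  rw [pv_tdc_acc m (m/2), pv_tdc_fuel (m/2) m (by omega)]
  simp

lemma pv_toDigits_ne_nil (m : Nat) (h1 : 1 ≤ m) : Nat.toDigits 2 m ≠ [] := by
  by_cases h2 : 2 ≤ m
  · rw [pv_toDigits_two_rec m h2]; simp
  · have : m = 1 := by omega
    subst this; decide

-- the main loop invariant: A's loop computes B's mapped reversed digit string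
lemma pv_loop_eq : ∀ (n : Nat), 1 ≤ n → ∀ (cs : List Char),
    pvLoopA (n : Int) (String.ofList cs) =
      String.ofList (cs ++ ((Nat.toDigits 2 n).drop 1).reverse.map (fun c => if c = '1' then 't' else 'f')) := by
  intro n
  induction n using Nat.strong_induction_on with
  | _ n ih =>
    intro h1 cs
    by_cases h2 : 2 ≤ n
    · rw [pvLoopA]
      rw [if_neg (show ¬ ((n:Int) ≤ 0) by omega), if_neg (show ¬ ((n:Int) = 1) by omega)]
      have hshift : (n : Int) >>> (1 : Nat) = ((n / 2 : Nat) : Int) := by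
        simp [Int.shiftRight_eq_div_pow]
      have hband : PySem.Int.band (n : Int) 1 = (n : Int) % 2 := by
        have := PySem.Int.band_natCast n 1
        simpa [Nat.and_one_is_mod] using this
      have hchar : (if PySem.Int.band (n:Int) 1 ≠ 0 then "t" else "f") =
          String.ofList [if Nat.digitChar (n % 2) = '1' then 't' else 'f'] := by
        rcases Nat.mod_two_eq_zero_or_one n with h | h
        · rw [if_neg (by simp [hband]; omega)]
          rw [h]; rfl
        · rw [if_pos (by simp [hband]; omega)]
          rw [h]; rfl
      rw [hchar, show String.ofList cs ++ String.ofList [if Nat.digitChar (n % 2) = '1' then 't' else 'f'] =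
            String.ofList (cs ++ [if Nat.digitChar (n % 2) = '1' then 't' else 'f']) from
          (String.ofList_append).symm]
      rw [hshift, ih (n/2) (by omega) (by omega) (cs ++ [if Nat.digitChar (n % 2) = '1' then 't' else 'f'])]
      rw [pv_toDigits_two_rec n h2]
      have hnn : 1 ≤ (Nat.toDigits 2 (n/2)).length :=
        List.length_pos_iff.mpr (pv_toDigits_ne_nil (n/2) (by omega))
      rw [List.drop_append_of_le_length (by omega)]
      apply congrArg String.ofList
      simp
    · have hn1 : n = 1 := by omega
      subst hn1
      have hc : ((1:Nat):Int) = 1 := by norm_num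
      rw [pvLoopA, hc, if_neg (show ¬ ((1:Int) ≤ 0) by omega), if_pos rfl]
      simp [show Nat.toDigits 2 1 = ['1'] from rfl]

-- ===== VERDICT (by name: the statement is the Claim_ definition above) =====
theorem parse_op_m_py_spec : Claim_equal_parse_op_m_py := by
  intro enc _ hpre
  unfold Pre_parse_op_m_py at hpre
  unfold Spec_parse_op_m_py parse_op_m_py parse_op_m_py_alt
  have hne : ¬ (enc = 0) := by omega
  rw [if_neg hne, if_neg hne]
  obtain ⟨n, rfl⟩ : ∃ n : Nat, enc = (n : Int) := ⟨enc.toNat, by omega⟩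
  have h1 : 1 ≤ n := by omega
  have hbin : PySem.Int.toBinChars0b (n : Int) = '0' :: 'b' :: Nat.toDigits 2 n := by
    simp [PySem.Int.toBinChars0b, show ¬ ((n:Int) < 0) by omega]
  have hmain := pv_loop_eq n h1 []
  rw [show ("" : String) = String.ofList [] from rfl, hmain]
  apply congrArg String.ofList
  rw [hbin, PySem.List.slice_from _ (by norm_num : (0:Int) ≤ 3)]
  simp
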